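-- pv_equiv track=rewrite | github.com/CBootland/Countdown-Numbers-Game | CountdownNumbersGame.py | _compute_part1
-- ===== SOURCE A (Python) =====
-- import math
--
-- def _div_and_rem(number: int, divisor: int) -> tuple[int, int]:
--     """Return the quotient and remainder"""
--     rem = number % divisor
--     div = number // divisor
--     return div, rem
--
-- def _compute_part1(counter: int, num_exc: int,
--                    n: int) -> tuple[list, int, list]:
--     """Subroutine of _compute_all"""
--     ops = ['+', '-', '*', '/']
--     operations = ['!'] * num_exc
--     tot = math.comb(n, num_exc)
--     parts = [tot]
--     y = counter
--     for j in range(n - 1 - num_exc):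
--         y, t = _div_and_rem(y, 4)
--         operations.append(ops[t])
--         if t == 3:
--             tot *= (n - num_exc - j) * (n - 1 - num_exc - j)
--             parts.append((n - num_exc - j) * (n - 1 - num_exc - j))
--         else:
--             tot *= math.comb(n - num_exc - j, 2)
--             parts.append(math.comb(n - num_exc - j, 2))
--     return operations, tot, parts
-- ===== SOURCE B (Python) =====
-- import math
--
-- def _compute_part1(counter: int, num_exc: int,
--                    n: int) -> tuple[list, int, list]:
--     """Subroutine of _compute_all (back-to-front build, closed-form total)"""
--     ops = ['+', '-', '*', '/']
--     m = n - 1 - num_exc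
--     if m < 0:
--         m = 0
--     operations = []
--     parts = []
--     halves = 0
--     for j in reversed(range(m)):
--         d = (counter >> (2 * j)) % 4
--         f = n - num_exc - j
--         operations.append(ops[d])
--         if d == 3:
--             parts.append(f * (f - 1))
--         else:
--             parts.append(f * (f - 1) // 2)
--             halves += 1
--     operations.reverse()
--     parts.reverse()
--     head = math.comb(n, num_exc)
--     tot = head * math.factorial(m + 1) * math.factorial(m) // 2 ** halves
--     return ['!'] * num_exc + operations, tot, [head] + parts
-- ===== Notes on version B (the rewrite author's own statement) =====
-- stated objective: alternative
-- what changed: B builds operations and parts back-to-front by random-access base-4 digit extraction (shift+mod, no running quotient), computes each part as f*(f-1) optionally halved instead of math.comb, and replaces A's running big-integer product by the closed form comb(n,num_exc)*(m+1)!*m!//2**halves.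
import Mathlib
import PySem

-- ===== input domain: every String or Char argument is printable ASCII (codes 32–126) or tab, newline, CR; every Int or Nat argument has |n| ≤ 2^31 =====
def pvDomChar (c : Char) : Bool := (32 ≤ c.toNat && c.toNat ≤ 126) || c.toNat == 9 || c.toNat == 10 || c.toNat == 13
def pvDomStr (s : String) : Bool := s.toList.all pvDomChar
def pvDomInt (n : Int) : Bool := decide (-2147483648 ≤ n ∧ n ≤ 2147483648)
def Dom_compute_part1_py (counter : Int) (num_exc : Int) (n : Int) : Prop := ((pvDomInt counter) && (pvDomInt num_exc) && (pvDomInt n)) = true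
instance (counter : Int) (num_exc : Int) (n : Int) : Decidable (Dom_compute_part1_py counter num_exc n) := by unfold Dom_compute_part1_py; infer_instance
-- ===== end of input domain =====

-- B builds operations/parts back-to-front by random-access digit extraction (shift+mod) and
-- replaces A's running big-integer product by a closed-form factorial formula (objective: alternative).

-- ===== PORT A =====
-- math.comb(n, k); exact for 0 ≤ n and 0 ≤ k (Pre_ guarantees every call sees that)
def pycomb (n k : Int) : Int := (Nat.choose n.toNat k.toNat : Int)

-- _div_and_rem: returns (quotient, remainder) like the Python helper (div, rem)
def div_and_rem_py (number : Int) (divisor : Int) : Int × Int :=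
  (PySem.Int.floordiv number divisor, PySem.Int.mod number divisor)

-- the body of A's for-loop (one iteration, on the tuple of A's mutable state)
def aBody (num_exc n : Int) (st : List String × Int × List Int × Int) (j : Int) :
    List String × Int × List Int × Int :=
  let ops : List String := ["+", "-", "*", "/"]
  let dr := div_and_rem_py st.2.2.2 4
  let y := dr.1
  let t := dr.2
  -- ops[t]: t = st.y % 4 ∈ [0,4), so pyGet? always returns; getD "" is exact
  let operations := st.1 ++ [(PySem.List.pyGet? ops t).getD ""]
  if t = 3 then
    (operations, st.2.1 * ((n - num_exc - j) * (n - 1 - num_exc - j)),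
     st.2.2.1 ++ [(n - num_exc - j) * (n - 1 - num_exc - j)], y)
  else
    (operations, st.2.1 * pycomb (n - num_exc - j) 2,
     st.2.2.1 ++ [pycomb (n - num_exc - j) 2], y)

def compute_part1_py (counter : Int) (num_exc : Int) (n : Int) : List String × Int × List Int :=
  let operations := List.replicate num_exc.toNat "!"
  let tot := pycomb n num_exc
  let parts := [tot]
  let st := (PySem.List.pyRange 0 (n - 1 - num_exc) 1).foldl (aBody num_exc n)
      (operations, tot, parts, counter)
  (st.1, st.2.1, st.2.2.1)

-- ===== PORT B =====
-- the body of B's for-loop over reversed(range(m)); state = (operations, parts, halves)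
def bBody (counter num_exc n : Int) (st : List String × List Int × Int) (j : Int) :
    List String × List Int × Int :=
  let ops : List String := ["+", "-", "*", "/"]
  -- Python 'counter >> (2*j)' is Lean's '>>>' (floor shift, exact); '% 4' is PySem.Int.mod
  let d := PySem.Int.mod (counter >>> (2 * j).toNat) 4
  let f := n - num_exc - j
  let operations := st.1 ++ [(PySem.List.pyGet? ops d).getD ""]
  if d = 3 then
    (operations, st.2.1 ++ [f * (f - 1)], st.2.2)
  else
    (operations, st.2.1 ++ [PySem.Int.floordiv (f * (f - 1)) 2], st.2.2 + 1)

def compute_part1_py_alt (counter : Int) (num_exc : Int) (n : Int) : List String × Int × List Int :=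
  let m0 := n - 1 - num_exc
  let m := if m0 < 0 then 0 else m0
  -- reversed(range(m))
  let st := ((PySem.List.pyRange 0 m 1).reverse).foldl (bBody counter num_exc n) ([], [], 0)
  let operations := st.1.reverse
  let parts := st.2.1.reverse
  let head := pycomb n num_exc
  -- math.factorial(x) = Nat.factorial x.toNat (x ≥ 0 here); '2 ** halves' with halves ≥ 0
  let tot := PySem.Int.floordiv
      (head * (Nat.factorial (m + 1).toNat : Int) * (Nat.factorial m.toNat : Int))
      (2 ^ st.2.2.toNat)
  (List.replicate num_exc.toNat "!" ++ operations, tot, [head] ++ parts)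

-- ===== PRECONDITION & SPEC =====
-- Pre_ excludes exactly the inputs where Python's math.comb raises ValueError: num_exc < 0 or n < 0.
def Pre_compute_part1_py (counter : Int) (num_exc : Int) (n : Int) : Prop :=
  0 ≤ num_exc ∧ 0 ≤ n
instance (counter : Int) (num_exc : Int) (n : Int) : Decidable (Pre_compute_part1_py counter num_exc n) := by unfold Pre_compute_part1_py; infer_instance
def pvWitness_compute_part1_py : Int × Int × Int := (37, 1, 5)

def Spec_compute_part1_py (counter : Int) (num_exc : Int) (n : Int) (out : List String × Int × List Int) : Prop := out = compute_part1_py_alt counter num_exc n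
instance (counter : Int) (num_exc : Int) (n : Int) (out : List String × Int × List Int) : Decidable (Spec_compute_part1_py counter num_exc n out) := by unfold Spec_compute_part1_py; infer_instance

-- ===== CLAIM (what is proved, stated in full; the proofs are below) =====
def Claim_equal_compute_part1_py : Prop := ∀ (counter : Int) (num_exc : Int) (n : Int), Dom_compute_part1_py counter num_exc n → Pre_compute_part1_py counter num_exc n → Spec_compute_part1_py counter num_exc n (compute_part1_py counter num_exc n)

-- ===== LEMMAS AND PROOFS =====

-- the operation symbol chosen for a digit (the expression both ports index ops with)
def opOf (t : Int) : String :=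
  (PySem.List.pyGet? (["+", "-", "*", "/"] : List String) t).getD ""

-- the base-4 digit of counter at position j, as B computes it
def digB (counter j : Int) : Int := PySem.Int.mod (counter >>> (2 * j).toNat) 4

-- the parts entry B produces at loop index j
def partB (counter num_exc n j : Int) : Int :=
  let f := n - num_exc - j
  if digB counter j = 3 then f * (f - 1) else PySem.Int.floordiv (f * (f - 1)) 2

-- the parts entry A produces at loop index j for digit d
def partAt (num_exc n j d : Int) : Int :=
  if d = 3 then (n - num_exc - j) * (n - 1 - num_exc - j) else pycomb (n - num_exc - j) 2

def partsAux (num_exc n : Int) : Int → List Int → List Int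
  | _, [] => []
  | j0, d :: ds => partAt num_exc n j0 d :: partsAux num_exc n (j0 + 1) ds

-- the base-4 digits of y, least significant first, exactly k of them (A's running quotient)
def digits4 (y : Int) : Nat → List Int
  | 0 => []
  | k + 1 => PySem.Int.mod y 4 :: digits4 (PySem.Int.floordiv y 4) k

-- y after k division steps (the discarded final accumulator of A's loop)
def yEnd (y : Int) : Nat → Int
  | 0 => y
  | k + 1 => yEnd (PySem.Int.floordiv y 4) k

lemma loopA (num_exc n : Int) :
    ∀ (k : Nat) (j0 y tot : Int) (opsAcc : List String) (partsAcc : List Int),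
      (PySem.List.pyRange j0 (j0 + (k : Int)) 1).foldl (aBody num_exc n)
        (opsAcc, tot, partsAcc, y)
      = (opsAcc ++ (digits4 y k).map opOf,
         tot * (partsAux num_exc n j0 (digits4 y k)).prod,
         partsAcc ++ partsAux num_exc n j0 (digits4 y k),
         yEnd y k) := by
  intro k
  induction k with
  | zero =>
      intro j0 y tot opsAcc partsAcc
      rw [PySem.List.pyRange_one_eq_nil (by omega : j0 + ((0 : Nat) : Int) ≤ j0)]
      simp [digits4, partsAux, yEnd]
  | succ k ih =>
      intro j0 y tot opsAcc partsAcc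
      have hcons : PySem.List.pyRange j0 (j0 + ((k + 1 : Nat) : Int)) 1
          = j0 :: PySem.List.pyRange (j0 + 1) ((j0 + 1) + (k : Int)) 1 := by
        rw [PySem.List.pyRange_one_cons (by push_cast; omega)]
        congr 1
        push_cast
        ring
      have hbody : aBody num_exc n (opsAcc, tot, partsAcc, y) j0
          = (opsAcc ++ [opOf (PySem.Int.mod y 4)],
             tot * partAt num_exc n j0 (PySem.Int.mod y 4),
             partsAcc ++ [partAt num_exc n j0 (PySem.Int.mod y 4)],
             PySem.Int.floordiv y 4) := by
        simp only [aBody, div_and_rem_py, opOf, partAt]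
        split <;> rfl
      rw [hcons, List.foldl_cons, hbody, ih (j0 + 1) (PySem.Int.floordiv y 4)]
      simp [digits4, partsAux, yEnd, List.append_assoc, mul_assoc]

-- B's loop: every contribution depends only on j, so the fold is a pair of maps plus a count
lemma loopB (c num_exc n : Int) :
    ∀ (js : List Int) (s : List String) (p : List Int) (z : Int),
      js.foldl (bBody c num_exc n) (s, p, z)
      = (s ++ js.map (fun j => opOf (digB c j)),
         p ++ js.map (partB c num_exc n),
         z + (js.countP (fun j => digB c j != 3) : Int)) := by
  intro js
  induction js with
  | nil => intro s p z; simp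
  | cons j js ih =>
      intro s p z
      have hbody : bBody c num_exc n (s, p, z) j
          = (s ++ [opOf (digB c j)], p ++ [partB c num_exc n j],
             z + if digB c j != 3 then 1 else 0) := by
        simp only [bBody, opOf, digB, partB]
        split <;> simp_all
      rw [List.foldl_cons, hbody, ih]
      by_cases h3 : digB c j = 3 <;>
        simp [List.countP_cons, h3, List.append_assoc] <;> push_cast <;> ring

lemma floordiv_floordiv4 (c : Int) (j : Nat) :
    PySem.Int.floordiv (PySem.Int.floordiv c ((4 : Int) ^ j)) 4
      = PySem.Int.floordiv c ((4 : Int) ^ (j + 1)) := by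
  rw [PySem.Int.floordiv_eq_ediv_of_pos (by positivity),
      PySem.Int.floordiv_eq_ediv_of_pos (by norm_num),
      PySem.Int.floordiv_eq_ediv_of_pos (by positivity),
      Int.ediv_ediv_of_nonneg (by positivity), pow_succ]

lemma digB_eq (c : Int) (j : Nat) :
    digB c (j : Int) = PySem.Int.mod (PySem.Int.floordiv c ((4 : Int) ^ j)) 4 := by
  unfold digB
  congr 1
  have ht : ((2 : Int) * (j : Int)).toNat = 2 * j := by omega
  rw [ht, Int.shiftRight_eq_div_pow,
      PySem.Int.floordiv_eq_ediv_of_pos (by positivity : (0 : Int) < (4 : Int) ^ j)]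
  congr 1
  rw [pow_mul]
  norm_num

-- the digit list A peels off sequentially is the list of B's random-access digits
lemma digits_pyRange (c : Int) :
    ∀ (k j0 : Nat), digits4 (PySem.Int.floordiv c ((4 : Int) ^ j0)) k
      = (PySem.List.pyRange (j0 : Int) ((j0 : Int) + (k : Int)) 1).map (digB c) := by
  intro k
  induction k with
  | zero =>
      intro j0
      rw [PySem.List.pyRange_one_eq_nil (by push_cast; omega)]
      simp [digits4]
  | succ k ih =>
      intro j0
      have hcons : PySem.List.pyRange (j0 : Int) ((j0 : Int) + ((k + 1 : Nat) : Int)) 1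
          = (j0 : Int) :: PySem.List.pyRange ((j0 : Int) + 1) (((j0 : Int) + 1) + (k : Int)) 1 := by
        rw [PySem.List.pyRange_one_cons (by push_cast; omega)]
        congr 1
        push_cast
        ring
      have hstep := ih (j0 + 1)
      push_cast at hstep
      rw [hcons, List.map_cons]
      show digits4 (PySem.Int.floordiv c ((4 : Int) ^ j0)) (k + 1) = _
      rw [digits4, floordiv_floordiv4, hstep, digB_eq c j0]

lemma pycomb_two (f : Int) (hf : 2 ≤ f) :
    pycomb f 2 = PySem.Int.floordiv (f * (f - 1)) 2 := by
  unfold pycomb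
  have h2 : (2 : Int).toNat = 2 := rfl
  have ha : (f.toNat : Int) = f := by omega
  have hb : ((f.toNat - 1 : Nat) : Int) = f - 1 := by omega
  rw [h2, Nat.choose_two_right, PySem.Int.floordiv_eq_ediv_of_pos (by norm_num),
      Int.natCast_ediv, Nat.cast_mul, ha, hb]
  norm_num

lemma two_mul_pycomb (f : Int) (hf : 2 ≤ f) : 2 * pycomb f 2 = f * (f - 1) := by
  rw [pycomb_two f hf, PySem.Int.floordiv_eq_ediv_of_pos (by norm_num)]
  refine Int.mul_ediv_cancel' ?_
  rcases Int.even_or_odd f with he | ho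
  · exact Dvd.dvd.mul_right he.two_dvd _
  · obtain ⟨t, ht⟩ := ho
    exact Dvd.dvd.mul_left ⟨t, by omega⟩ f

-- A's per-step part equals B's per-step part (the loop keeps f = n - num_exc - j ≥ 2)
lemma partsAux_map (c num_exc n : Int) :
    ∀ (k j0 : Nat), n - num_exc - (j0 : Int) = (k : Int) + 1 →
      partsAux num_exc n (j0 : Int)
          ((PySem.List.pyRange (j0 : Int) ((j0 : Int) + (k : Int)) 1).map (digB c))
        = (PySem.List.pyRange (j0 : Int) ((j0 : Int) + (k : Int)) 1).map (partB c num_exc n) := by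
  intro k
  induction k with
  | zero =>
      intro j0 _
      rw [PySem.List.pyRange_one_eq_nil (by push_cast; omega)]
      simp [partsAux]
  | succ k ih =>
      intro j0 hf
      have hcons : PySem.List.pyRange (j0 : Int) ((j0 : Int) + ((k + 1 : Nat) : Int)) 1
          = (j0 : Int) :: PySem.List.pyRange ((j0 : Int) + 1) (((j0 : Int) + 1) + (k : Int)) 1 := by
        rw [PySem.List.pyRange_one_cons (by push_cast; omega)]
        congr 1
        push_cast
        ring
      have hstep := ih (j0 + 1) (by push_cast at hf ⊢; omega)
      push_cast at hstep
      rw [hcons, List.map_cons, List.map_cons, partsAux, hstep]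
      congr 1
      have hf2 : 2 ≤ n - num_exc - (j0 : Int) := by push_cast at hf; omega
      unfold partAt partB
      by_cases h3 : digB c (j0 : Int) = 3
      · simp only [h3, if_pos rfl, if_true]
        ring
      · simp only [if_neg h3]
        rw [pycomb_two _ hf2]

-- the closed form: 2^(#non-3 digits) * product of parts = (k+1)! * k!
lemma prod_parts (num_exc n : Int) :
    ∀ (ds : List Int) (j0 : Int), n - num_exc - j0 = (ds.length : Int) + 1 →
      (2 : Int) ^ (ds.countP (fun d => d != 3)) * (partsAux num_exc n j0 ds).prod
        = (Nat.factorial (ds.length + 1) : Int) * (Nat.factorial ds.length : Int) := by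
  intro ds
  induction ds with
  | nil => intro j0 _; simp [partsAux, Nat.factorial]
  | cons d t ih =>
      intro j0 hf
      have hstep := ih (j0 + 1) (by simp at hf ⊢; omega)
      have hf0 : n - num_exc - j0 = (t.length : Int) + 2 := by simp at hf; omega
      rw [partsAux, List.prod_cons, List.countP_cons]
      simp only [List.length_cons]
      by_cases h3 : d = 3
      · subst h3
        have hA : partAt num_exc n j0 3 = (n - num_exc - j0) * (n - num_exc - j0 - 1) := by
          unfold partAt
          rw [if_pos rfl]
          ring
        have hcnt : (List.countP (fun d => d != 3) t
              + if ((3 : Int) != 3) = true then 1 else 0)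
            = List.countP (fun d => d != 3) t := by norm_num
        rw [hA, hcnt]
        rw [show (2 : Int) ^ List.countP (fun d => d != 3) t *
              ((n - num_exc - j0) * (n - num_exc - j0 - 1)
                * (partsAux num_exc n (j0 + 1) t).prod)
            = (n - num_exc - j0) * (n - num_exc - j0 - 1) *
                ((2 : Int) ^ List.countP (fun d => d != 3) t
                  * (partsAux num_exc n (j0 + 1) t).prod) from by ring,
          hstep, hf0, Nat.factorial_succ (t.length + 1), Nat.factorial_succ t.length]
        push_cast
        ring
      · have hA : partAt num_exc n j0 d = pycomb (n - num_exc - j0) 2 := by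
          unfold partAt
          rw [if_neg h3]
        have hne : (d != 3) = true := by simpa using h3
        have hcnt : (List.countP (fun d => d != 3) t
              + if (d != 3) = true then 1 else 0)
            = List.countP (fun d => d != 3) t + 1 := by simp [hne]
        rw [hA, hcnt, pow_succ]
        rw [show (2 : Int) ^ List.countP (fun d => d != 3) t * 2 *
              (pycomb (n - num_exc - j0) 2 * (partsAux num_exc n (j0 + 1) t).prod)
            = (2 * pycomb (n - num_exc - j0) 2) *
                ((2 : Int) ^ List.countP (fun d => d != 3) t
                  * (partsAux num_exc n (j0 + 1) t).prod) from by ring,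
          two_mul_pycomb _ (by omega), hstep, hf0,
          Nat.factorial_succ (t.length + 1), Nat.factorial_succ t.length]
        push_cast
        ring

lemma length_digits4 (y : Int) : ∀ k, (digits4 y k).length = k := by
  intro k
  induction k generalizing y with
  | zero => simp [digits4]
  | succ k ih => simp [digits4, ih]

theorem compute_part1_py_spec : Claim_equal_compute_part1_py := by
  intro counter num_exc n _ hpre
  unfold Spec_compute_part1_py compute_part1_py compute_part1_py_alt
  dsimp only
  have hrA : PySem.List.pyRange 0 (n - 1 - num_exc) 1
      = PySem.List.pyRange 0 (0 + ((n - 1 - num_exc).toNat : Int)) 1 := by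
    rw [PySem.List.pyRange_one, PySem.List.pyRange_one]
    congr 2
    omega
  set k := (n - 1 - num_exc).toNat with hk
  have hrB : (if n - 1 - num_exc < 0 then (0:Int) else n - 1 - num_exc) = (k : Int) := by
    split_ifs <;> omega
  rw [hrA, loopA num_exc n k 0 counter, hrB, loopB counter num_exc n]
  simp only [List.nil_append, List.map_reverse, List.reverse_reverse, List.countP_reverse,
    zero_add, Int.toNat_natCast]
  have hdig : digits4 counter k
      = (PySem.List.pyRange 0 (k : Int) 1).map (digB counter) := by
    have h0 := digits_pyRange counter k 0
    simpa [pow_zero, PySem.Int.floordiv_eq_ediv_of_pos, Int.ediv_one] using h0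
  by_cases hk0 : k = 0
  · simp only [hk0, Nat.cast_zero]
    rw [PySem.List.pyRange_one_eq_nil (le_refl 0)]
    simp only [List.map_nil, List.countP_nil, List.append_nil, digits4, partsAux,
      List.prod_nil, mul_one]
    norm_num [Nat.factorial]
  · have hkpos : 0 < k := Nat.pos_of_ne_zero hk0
    have hnk : n - num_exc - ((0 : Nat) : Int) = (k : Int) + 1 := by
      simp only [Nat.cast_zero, sub_zero]
      omega
    have hparts := partsAux_map counter num_exc n k 0 hnk
    simp only [Nat.cast_zero, zero_add] at hparts
    have hcnt : (digits4 counter k).countP (fun d => d != 3)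
        = (PySem.List.pyRange 0 (k : Int) 1).countP (fun j => digB counter j != 3) := by
      rw [hdig, List.countP_map]
      rfl
    have hprod := prod_parts num_exc n (digits4 counter k) 0
      (by rw [length_digits4]; omega)
    rw [length_digits4] at hprod
    have h1 : ((k : Int) + 1).toNat = k + 1 := by omega
    rw [h1]
    refine Prod.ext ?_ (Prod.ext ?_ ?_)
    · dsimp only
      rw [hdig, List.map_map]
      simp [Function.comp]
    · dsimp only
      have hnum : pycomb n num_exc * ((Nat.factorial (k + 1) : Int))
            * ((Nat.factorial k : Int))
          = 2 ^ ((PySem.List.pyRange 0 (k : Int) 1).countP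
                (fun j => digB counter j != 3))
              * (pycomb n num_exc * (partsAux num_exc n 0 (digits4 counter k)).prod) := by
        rw [← hcnt]
        calc pycomb n num_exc * ((Nat.factorial (k + 1) : Int)) * ((Nat.factorial k : Int))
            = pycomb n num_exc
                * ((Nat.factorial (k + 1) : Int) * (Nat.factorial k : Int)) := by ring
          _ = pycomb n num_exc
                * (2 ^ ((digits4 counter k).countP (fun d => d != 3))
                    * (partsAux num_exc n 0 (digits4 counter k)).prod) := by rw [hprod]
          _ = 2 ^ ((digits4 counter k).countP (fun d => d != 3))
                * (pycomb n num_exc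
                    * (partsAux num_exc n 0 (digits4 counter k)).prod) := by ring
      rw [hnum, PySem.Int.floordiv_eq_ediv_of_pos (by positivity),
        Int.mul_ediv_cancel_left _ (pow_ne_zero _ (by norm_num))]
    · dsimp only
      rw [hdig, hparts]
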